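-- pv_equiv track=rewrite | github.com/architagupta21/PokerHands | poker.py | toReplace
-- ===== SOURCE A (Python) =====
-- def toReplace(cards):
--   newCards = list(map(lambda x:14 if x=="A" else x,cards))
--   newCards = list(map(lambda x:10 if x=="T" else x,newCards))
--   newCards = list(map(lambda x:11 if x=="J" else x,newCards))
--   newCards = list(map(lambda x:12 if x=="Q" else x,newCards))
--   newCards = list(map(lambda x:13 if x=="K" else x,newCards))
--   newCards = [ int(x) for x in newCards ]
--   return newCards
-- ===== SOURCE B (Python) =====
-- def toReplace(cards):
--     faces = "TJQKA"
--     res = []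
--     for c in cards:
--         i = faces.find(c) if len(c) == 1 else -1
--         res.append(10 + i if i != -1 else int(c))
--     return res
-- ===== Notes on version B (the rewrite author's own statement) =====
-- stated objective: alternative
-- what changed: Replaces A's six staged list-building passes (five per-face conditional substitution maps plus an int() comprehension) with a single accumulator loop that derives a face's rank arithmetically as 10 + its position in the string "TJQKA" (guarded by len(c)==1) and falls through to int(c) otherwise.
import Mathlib
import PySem

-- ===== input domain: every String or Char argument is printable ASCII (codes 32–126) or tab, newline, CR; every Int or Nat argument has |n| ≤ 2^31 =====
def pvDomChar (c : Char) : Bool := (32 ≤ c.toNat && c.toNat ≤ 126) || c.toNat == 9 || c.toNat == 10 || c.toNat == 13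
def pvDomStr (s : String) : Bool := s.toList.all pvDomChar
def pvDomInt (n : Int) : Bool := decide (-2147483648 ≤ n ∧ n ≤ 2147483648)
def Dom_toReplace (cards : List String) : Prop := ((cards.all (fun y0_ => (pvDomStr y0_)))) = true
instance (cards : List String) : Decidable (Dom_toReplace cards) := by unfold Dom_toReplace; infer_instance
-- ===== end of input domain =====

-- B replaces A's six staged substitution/int() passes by one accumulator loop computing a face's
-- rank as 10 + its position in "TJQKA" (objective: alternative).


-- ===== PORT A =====
-- After each map pass an element is either an already-substituted Int or still a String: Sum Int String.
def pvStepA (face : String) (v : Int) (x : Sum Int String) : Sum Int String :=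
  match x with
  | .inl n => .inl n
  | .inr s => if s = face then .inl v else .inr s

-- int(x) on a mixed element; int() on an int is the identity, on a string it is PySem.Int.ofStr?
-- (none = ValueError, excluded by Pre_; .getD 0 is only reached outside Pre_).
def pvIntOf (x : Sum Int String) : Int :=
  match x with
  | .inl n => n
  | .inr s => (PySem.Int.ofStr? s).getD 0

def toReplace (cards : List String) : List Int :=
  let n0 := cards.map Sum.inr
  let n1 := n0.map (pvStepA "A" 14)
  let n2 := n1.map (pvStepA "T" 10)
  let n3 := n2.map (pvStepA "J" 11)
  let n4 := n3.map (pvStepA "Q" 12)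
  let n5 := n4.map (pvStepA "K" 13)
  n5.map pvIntOf

-- ===== PORT B =====
-- rank of one card: 10 + position of c in "TJQKA" when c is a single character occurring there,
-- otherwise int(c) (.getD 0 only reached outside Pre_, where Python raises ValueError).
def pvRankB (c : String) : Int :=
  let i : Int := if PySem.Str.len c = 1 then PySem.Str.find "TJQKA" c else -1
  if i ≠ -1 then 10 + i else (PySem.Int.ofStr? c).getD 0

-- the accumulator loop of Source B
def pvGoB (res : List Int) : List String → List Int
  | [] => res
  | c :: rest => pvGoB (res ++ [pvRankB c]) rest

def toReplace_alt (cards : List String) : List Int :=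
  pvGoB [] cards

-- ===== PRECONDITION & SPEC =====
-- Pre_ excludes exactly the inputs on which Python A raises ValueError: a card that is
-- neither one of the five face letters nor an int()-parsable string. (B raises there too.)
def Pre_toReplace (cards : List String) : Prop :=
  ∀ c ∈ cards, c = "A" ∨ c = "T" ∨ c = "J" ∨ c = "Q" ∨ c = "K" ∨ (PySem.Int.ofStr? c).isSome
instance (cards : List String) : Decidable (Pre_toReplace cards) := by unfold Pre_toReplace; infer_instance

def pvWitness_toReplace : List String := ["A", "K", "7", "10"]

def Spec_toReplace (cards : List String) (out : List Int) : Prop := out = toReplace_alt cards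
instance (cards : List String) (out : List Int) : Decidable (Spec_toReplace cards out) := by unfold Spec_toReplace; infer_instance

-- ===== CLAIM (what is proved, stated in full; the proofs are below) =====
def Claim_equal_toReplace : Prop := ∀ (cards : List String), Dom_toReplace cards → Pre_toReplace cards → Spec_toReplace cards (toReplace cards)

-- ===== LEMMAS AND PROOFS =====
-- the accumulator loop is map
theorem pvGoB_eq (res : List Int) (xs : List String) : pvGoB res xs = res ++ xs.map pvRankB := by
  induction xs generalizing res with
  | nil => simp [pvGoB]
  | cons c rest ih => simp [pvGoB, ih]

-- a single-character string that is none of the five faces is not found in "TJQKA"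
theorem pvFind_single_neg (ch : Char)
    (hT : ch ≠ 'T') (hJ : ch ≠ 'J') (hQ : ch ≠ 'Q') (hK : ch ≠ 'K') (hA : ch ≠ 'A') :
    PySem.Str.find "TJQKA" (String.ofList [ch]) = -1 := by
  rw [PySem.Str.find_eq_neg_one_iff]
  intro hinf
  have hm : ch ∈ ("TJQKA" : String).toList := hinf.subset (by simp)
  have hl : ("TJQKA" : String).toList = ['T','J','Q','K','A'] := by decide
  rw [hl] at hm
  simp at hm
  rcases hm with h | h | h | h | h <;> exact absurd h (by assumption)

-- per-element agreement, given the element is a face or int()-parsable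
theorem pvElem_eq (c : String)
    (h : c = "A" ∨ c = "T" ∨ c = "J" ∨ c = "Q" ∨ c = "K" ∨ (PySem.Int.ofStr? c).isSome) :
    pvIntOf (pvStepA "K" 13 (pvStepA "Q" 12 (pvStepA "J" 11 (pvStepA "T" 10
      (pvStepA "A" 14 (Sum.inr c)))))) = pvRankB c := by
  by_cases hA : c = "A"; · subst hA; decide
  by_cases hT : c = "T"; · subst hT; decide
  by_cases hJ : c = "J"; · subst hJ; decide
  by_cases hQ : c = "Q"; · subst hQ; decide
  by_cases hK : c = "K"; · subst hK; decide
  -- non-face card: A computes int(c); show B's find branch cannot fire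
  have hAval : pvIntOf (pvStepA "K" 13 (pvStepA "Q" 12 (pvStepA "J" 11 (pvStepA "T" 10
      (pvStepA "A" 14 (Sum.inr c)))))) = (PySem.Int.ofStr? c).getD 0 := by
    simp [pvStepA, pvIntOf, hA, hT, hJ, hQ, hK]
  rw [hAval]
  by_cases hlen : PySem.Str.len c = 1
  · -- c is a single non-face character: find "TJQKA" c = -1
    have hlen' : c.toList.length = 1 := by
      simp [PySem.Str.len] at hlen
      simpa using hlen
    obtain ⟨ch, hch⟩ : ∃ ch, c.toList = [ch] := by
      rcases hl : c.toList with _ | ⟨ch, _ | _⟩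
      · simp [hl] at hlen'
      · exact ⟨ch, rfl⟩
      · simp [hl] at hlen'
    have hc : c = String.ofList [ch] := by
      have := congrArg String.ofList hch
      simpa using this
    subst hc
    have hfind : PySem.Str.find "TJQKA" (String.ofList [ch]) = -1 := by
      apply pvFind_single_neg <;> intro he <;> subst he <;> simp_all
    simp only [pvRankB, if_pos hlen, hfind]
    simp
  · simp only [pvRankB, if_neg hlen]
    simp

-- ===== VERDICT (by name: the statement is the Claim_ definition above) =====
theorem toReplace_spec : Claim_equal_toReplace := by
  intro cards _ hpre
  show toReplace cards = toReplace_alt cards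
  simp only [toReplace, toReplace_alt, List.map_map, pvGoB_eq, List.nil_append]
  exact List.map_congr_left (fun c hc => pvElem_eq c (hpre c hc))
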